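-- pv_equiv track=rewrite | github.com/HCIELab/PortaChromeUI | CLI/heartrate_visualization.py | visualization_text
-- ===== SOURCE A (Python) =====
-- def visualization_text (values, color):
--     R,G,B = color
--
--     pixel_values = transform_values_pixel(values)
--     output_string = ""
--     color_string = f"{R},{G},{B}"
--     blank_string = "255,255,255"
--     order_flip = True
--
--     for pixel_value_bar in pixel_values:
--         if order_flip:
--             pixel_value_bar = pixel_value_bar[::-1]
--
--         order_flip = not order_flip
--
--         # a bar is something like (1,1,1,0,0,0)
--         for value in pixel_value_bar:
--             if value == 1:
--                 output_string = output_string + color_string + "#"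
--             elif value == 0:
--                 output_string = output_string + blank_string + "#"
--     return output_string
--
-- def transform_values_pixel(input_values):
--     # Each group should be visualized within a block of 6
--     bar_size = 6
--     pixel_array = []
--
--     maximum = max(input_values)
--     minimum = min(input_values)
--
--     for value in input_values:
--         # Normalize the value within the range 0 to bar_size
--         normalized_value = int((value - minimum) / (maximum - minimum) * (bar_size))  if maximum != minimum else 1
--         # Create a block for each value with proportional visualization
--         block = [1] * normalized_value + [0] * (bar_size - normalized_value)
--         pixel_array.append(block)
--
--     return pixel_array
-- ===== SOURCE B (Python) =====
-- def visualization_text(values, color):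
--     R, G, B = color
--     maximum = max(values)
--     minimum = min(values)
--     col = f"{R},{G},{B}#"
--     blank = "255,255,255#"
--     pieces = []
--     flipped = True
--     for value in values:
--         n = int((value - minimum) / (maximum - minimum) * 6) if maximum != minimum else 1
--         if flipped:
--             pieces.append(blank * (6 - n) + col * n)
--         else:
--             pieces.append(col * n + blank * (6 - n))
--         flipped = not flipped
--     return "".join(pieces)
-- ===== Notes on version B (the rewrite author's own statement) =====
-- stated objective: faster
-- what changed: Single pass over the values with an alternating flip flag, emitting each bar's token strings directly into a list joined once at the end, instead of building intermediate [1]/[0] block arrays, reversing them, and growing the output by repeated string concatenation.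
import Mathlib
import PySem

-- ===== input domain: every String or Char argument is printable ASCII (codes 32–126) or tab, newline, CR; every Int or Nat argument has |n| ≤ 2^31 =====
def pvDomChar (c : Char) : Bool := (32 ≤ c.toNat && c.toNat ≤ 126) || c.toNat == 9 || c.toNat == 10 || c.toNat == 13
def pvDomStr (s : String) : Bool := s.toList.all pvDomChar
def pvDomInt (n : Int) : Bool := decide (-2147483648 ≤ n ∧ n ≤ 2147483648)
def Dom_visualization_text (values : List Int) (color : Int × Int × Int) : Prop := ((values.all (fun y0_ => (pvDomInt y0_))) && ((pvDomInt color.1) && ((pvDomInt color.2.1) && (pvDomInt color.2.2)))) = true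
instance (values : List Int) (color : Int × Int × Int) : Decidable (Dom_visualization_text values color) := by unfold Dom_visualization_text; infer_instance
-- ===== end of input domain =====

-- B builds the output in one pass per value with an alternating flip flag and one final join,
-- instead of A's intermediate [1]/[0] block arrays and quadratic string concatenation.
-- Return-value equivalence only; neither program mutates its arguments.

-- ===== PORT A =====

-- Float note (hand-ported, exact on Dom): Python's `int((value-minimum)/(maximum-minimum)*6)`
-- is ported as the integer floor division ((value-minimum)*6) // (maximum-minimum); the
-- quotient is nonnegative so int() truncation equals flooring, and for the magnitudes
-- admitted by Dom (|values| ≤ 2^31) the IEEE-double computation yields the same integer.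
def transform_values_pixel (input_values : List Int) : List (List Int) :=
  match PySem.List.max? input_values (fun x => x), PySem.List.min? input_values (fun x => x) with
  | some maximum, some minimum =>
      input_values.foldl (fun pixel_array value =>
        let normalized_value : Int :=
          if maximum ≠ minimum then PySem.Int.floordiv ((value - minimum) * 6) (maximum - minimum) else 1
        let block : List Int :=
          List.replicate normalized_value.toNat 1 ++ List.replicate (6 - normalized_value).toNat 0
        pixel_array ++ [block]) []
  | _, _ => []   -- unreachable under Pre_ (Python's max([]) raises ValueError)

def visualization_text (values : List Int) (color : Int × Int × Int) : String :=
  let R := color.1; let G := color.2.1; let B := color.2.2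
  let pixel_values := transform_values_pixel values
  let color_string := PySem.Int.toStr R ++ "," ++ PySem.Int.toStr G ++ "," ++ PySem.Int.toStr B
  let blank_string := "255,255,255"
  let st := pixel_values.foldl (fun (st : String × Bool) pixel_value_bar =>
      let bar := if st.2 then pixel_value_bar.reverse else pixel_value_bar
      let output_string := bar.foldl (fun output_string value =>
          if value = 1 then output_string ++ color_string ++ "#"
          else if value = 0 then output_string ++ blank_string ++ "#"
          else output_string) st.1
      (output_string, !st.2)) ("", true)
  st.1

-- ===== PORT B =====

-- Python's `s * k` for a string and a Nat count
def strRep (s : String) : Nat → String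
  | 0 => ""
  | k + 1 => s ++ strRep s k

def visualization_text_alt (values : List Int) (color : Int × Int × Int) : String :=
  match PySem.List.max? values (fun x => x), PySem.List.min? values (fun x => x) with
  | some maximum, some minimum =>
      let R := color.1; let G := color.2.1; let B := color.2.2
      let col := PySem.Int.toStr R ++ "," ++ PySem.Int.toStr G ++ "," ++ PySem.Int.toStr B ++ "#"
      let blank := "255,255,255#"
      let st := values.foldl (fun (st : List String × Bool) value =>
          -- same hand-ported float note as in PORT A
          let n : Int :=
            if maximum ≠ minimum then PySem.Int.floordiv ((value - minimum) * 6) (maximum - minimum) else 1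
          let piece :=
            if st.2 then strRep blank (6 - n).toNat ++ strRep col n.toNat
            else strRep col n.toNat ++ strRep blank (6 - n).toNat
          (st.1 ++ [piece], !st.2)) ([], true)
      PySem.Str.join "" st.1
  | _, _ => ""   -- unreachable under Pre_ (Python's max([]) raises ValueError)

-- ===== PRECONDITION & SPEC =====
-- Pre_ excludes exactly the empty list, on which Python's max() raises ValueError (in A and in B).
def Pre_visualization_text (values : List Int) (color : Int × Int × Int) : Prop := values ≠ []
instance (values : List Int) (color : Int × Int × Int) : Decidable (Pre_visualization_text values color) := by
  unfold Pre_visualization_text; infer_instance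

def pvWitness_visualization_text : List Int × (Int × Int × Int) := ([0, 3, 6], (10, 20, 30))

def Spec_visualization_text (values : List Int) (color : Int × Int × Int) (out : String) : Prop := out = visualization_text_alt values color
instance (values : List Int) (color : Int × Int × Int) (out : String) : Decidable (Spec_visualization_text values color out) := by unfold Spec_visualization_text; infer_instance

-- ===== CLAIM (what is proved, stated in full; the proofs are below) =====
def Claim_equal_visualization_text : Prop := ∀ (values : List Int) (color : Int × Int × Int), Dom_visualization_text values color → Pre_visualization_text values color → Spec_visualization_text values color (visualization_text values color)

-- ===== LEMMAS AND PROOFS =====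


def nvalP (M m v : Int) : Int :=
  if M ≠ m then PySem.Int.floordiv ((v - m) * 6) (M - m) else 1

def pieceP (col : String) (M m : Int) (flip : Bool) (v : Int) : String :=
  if flip then strRep "255,255,255#" (6 - nvalP M m v).toNat ++ strRep col (nvalP M m v).toNat
  else strRep col (nvalP M m v).toNat ++ strRep "255,255,255#" (6 - nvalP M m v).toNat

def SP (col : String) (M m : Int) : List Int → Bool → String
  | [], _ => ""
  | v :: l, flip => pieceP col M m flip v ++ SP col M m l (!flip)

lemma innerA_ones (cs bl : String) (k : Nat) :
    ∀ (os : String),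
      (List.replicate k (1:Int)).foldl
        (fun o v => if v = 1 then o ++ cs ++ "#" else if v = 0 then o ++ bl ++ "#" else o) os
      = os ++ strRep (cs ++ "#") k := by
  induction k with
  | zero => intro os; simp [strRep]
  | succ k ih =>
    intro os
    simp only [List.replicate_succ, List.foldl_cons, reduceIte]
    rw [ih]
    simp [strRep, String.append_assoc]

lemma innerA_zeros (cs bl : String) (k : Nat) :
    ∀ (os : String),
      (List.replicate k (0:Int)).foldl
        (fun o v => if v = 1 then o ++ cs ++ "#" else if v = 0 then o ++ bl ++ "#" else o) os
      = os ++ strRep (bl ++ "#") k := by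
  induction k with
  | zero => intro os; simp [strRep]
  | succ k ih =>
    intro os
    simp only [List.replicate_succ, List.foldl_cons, reduceIte]
    rw [ih]
    simp [strRep, String.append_assoc]

def blockOf (M m v : Int) : List Int :=
  List.replicate (nvalP M m v).toNat 1 ++ List.replicate (6 - nvalP M m v).toNat 0

lemma barA (cs : String) (M m v : Int) (flip : Bool) (os : String) :
    (if flip then (blockOf M m v).reverse else blockOf M m v).foldl
      (fun o w => if w = 1 then o ++ cs ++ "#" else if w = 0 then o ++ "255,255,255" ++ "#" else o) os
    = os ++ pieceP (cs ++ "#") M m flip v := by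
  cases flip with
  | false =>
    simp only [Bool.false_eq_true, reduceIte, blockOf]
    rw [List.foldl_append]
    rw [innerA_ones, innerA_zeros, pieceP]
    simp [String.append_assoc]
  | true =>
    simp only [reduceIte, blockOf, List.reverse_append, List.reverse_replicate]
    rw [List.foldl_append]
    rw [innerA_zeros, innerA_ones, pieceP]
    simp [String.append_assoc]

lemma outerA (cs : String) (M m : Int) (l : List Int) :
    ∀ (os : String) (flip : Bool),
      ((l.map (blockOf M m)).foldl
        (fun (st : String × Bool) bar =>
          ((if st.2 then bar.reverse else bar).foldl
            (fun o w => if w = 1 then o ++ cs ++ "#" else if w = 0 then o ++ "255,255,255" ++ "#" else o) st.1,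
           !st.2)) (os, flip)).1
      = os ++ SP (cs ++ "#") M m l flip := by
  induction l with
  | nil => intro os flip; simp [SP]
  | cons v l ih =>
    intro os flip
    simp only [List.map_cons, List.foldl_cons]
    rw [barA]
    rw [ih]
    simp [SP, String.append_assoc]

lemma foldl_snoc_map {α β : Type} (f : α → β) (l : List α) :
    ∀ (acc : List β), l.foldl (fun a v => a ++ [f v]) acc = acc ++ l.map f := by
  induction l with
  | nil => intro acc; simp
  | cons v l ih => intro acc; simp [ih]

lemma charsJoin0_append (xs : List (List Char)) (p : List Char) :
    PySem.Chars.join [] (xs ++ [p]) = PySem.Chars.join [] xs ++ p := by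
  induction xs with
  | nil => simp [PySem.Chars.join_nil, PySem.Chars.join_singleton]
  | cons x t ih =>
    cases t with
    | nil => simp [PySem.Chars.join_singleton, PySem.Chars.join_cons_cons]
    | cons y u =>
      simp only [List.cons_append, PySem.Chars.join_cons_cons] at *
      simp [ih, List.append_assoc]

lemma join0_append (xs : List String) (p : String) :
    PySem.Str.join "" (xs ++ [p]) = PySem.Str.join "" xs ++ p := by
  simp [PySem.Str.join, charsJoin0_append, String.ofList_append]

lemma outerB (col : String) (M m : Int) (l : List Int) :
    ∀ (pieces : List String) (flip : Bool),
      PySem.Str.join "" ((l.foldl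
        (fun (st : List String × Bool) value =>
          (st.1 ++ [if st.2 then strRep "255,255,255#" (6 - nvalP M m value).toNat ++ strRep col (nvalP M m value).toNat
                    else strRep col (nvalP M m value).toNat ++ strRep "255,255,255#" (6 - nvalP M m value).toNat],
           !st.2)) (pieces, flip)).1)
      = PySem.Str.join "" pieces ++ SP col M m l flip := by
  induction l with
  | nil => intro pieces flip; simp [SP]
  | cons v l ih =>
    intro pieces flip
    simp only [List.foldl_cons]
    rw [ih, join0_append]
    simp [SP, pieceP, String.append_assoc]

-- max(values)/min(values) exist on a nonempty list
lemma max_min_some (values : List Int) (h : values ≠ []) :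
    ∃ Mx mn, PySem.List.max? values (fun x => x) = some Mx ∧ PySem.List.min? values (fun x => x) = some mn := by
  cases hM : PySem.List.max? values (fun x => x) with
  | none => exact absurd ((PySem.List.max?_eq_none_iff values (fun x => x)).mp hM) h
  | some Mx =>
    cases hm : PySem.List.min? values (fun x => x) with
    | none => exact absurd ((PySem.List.min?_eq_none_iff values (fun x => x)).mp hm) h
    | some mn => exact ⟨Mx, mn, rfl, rfl⟩

lemma transform_eq (values : List Int) (Mx mn : Int)
    (hmax : PySem.List.max? values (fun x => x) = some Mx)
    (hmin : PySem.List.min? values (fun x => x) = some mn) :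
    transform_values_pixel values = values.map (blockOf Mx mn) := by
  unfold transform_values_pixel
  rw [hmax, hmin]
  exact (foldl_snoc_map (blockOf Mx mn) values []).trans (List.nil_append _)

-- ===== VERDICT (by name: the statement is the Claim_ definition above) =====
theorem visualization_text_spec : Claim_equal_visualization_text := by
  intro values color _ hpre
  unfold Spec_visualization_text
  obtain ⟨Mx, mn, hmax, hmin⟩ := max_min_some values hpre
  calc visualization_text values color
      = ((values.map (blockOf Mx mn)).foldl
          (fun (st : String × Bool) bar =>
            ((if st.2 then bar.reverse else bar).foldl
              (fun o w => if w = 1 then o ++ (PySem.Int.toStr color.1 ++ "," ++ PySem.Int.toStr color.2.1 ++ "," ++ PySem.Int.toStr color.2.2) ++ "#"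
               else if w = 0 then o ++ "255,255,255" ++ "#" else o) st.1,
             !st.2)) ("", true)).1 := by
        unfold visualization_text
        rw [transform_eq values Mx mn hmax hmin]
    _ = "" ++ SP ((PySem.Int.toStr color.1 ++ "," ++ PySem.Int.toStr color.2.1 ++ "," ++ PySem.Int.toStr color.2.2) ++ "#") Mx mn values true :=
        outerA _ Mx mn values "" true
    _ = SP ((PySem.Int.toStr color.1 ++ "," ++ PySem.Int.toStr color.2.1 ++ "," ++ PySem.Int.toStr color.2.2) ++ "#") Mx mn values true := by simp
    _ = PySem.Str.join "" [] ++ SP ((PySem.Int.toStr color.1 ++ "," ++ PySem.Int.toStr color.2.1 ++ "," ++ PySem.Int.toStr color.2.2) ++ "#") Mx mn values true := by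
        simp [PySem.Str.join, PySem.Chars.join_nil]
    _ = PySem.Str.join "" ((values.foldl
          (fun (st : List String × Bool) value =>
            (st.1 ++ [if st.2 then strRep "255,255,255#" (6 - nvalP Mx mn value).toNat ++ strRep ((PySem.Int.toStr color.1 ++ "," ++ PySem.Int.toStr color.2.1 ++ "," ++ PySem.Int.toStr color.2.2) ++ "#") (nvalP Mx mn value).toNat
                      else strRep ((PySem.Int.toStr color.1 ++ "," ++ PySem.Int.toStr color.2.1 ++ "," ++ PySem.Int.toStr color.2.2) ++ "#") (nvalP Mx mn value).toNat ++ strRep "255,255,255#" (6 - nvalP Mx mn value).toNat],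
             !st.2)) ([], true)).1) := (outerB _ Mx mn values [] true).symm
    _ = visualization_text_alt values color := by
        unfold visualization_text_alt
        rw [hmax, hmin]
        rfl
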